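-- pv_equiv track=rewrite | github.com/Gaurang-1402/binarysearch.com | Distributed Systems.py | solve
-- ===== SOURCE A (Python) =====
-- import collections
-- import heapq
--
-- def solve(n, edges):
--     # the advantage of using collections.defaultdisct(list)
--     # is that we don't need to check for membership.
--     # if something doesn't exist, it will automatically be initialized
--     adjacency_list_with_weights = collections.defaultdict(list)
--
--     for start, end, weight in edges:
--         adjacency_list_with_weights[start].append((end, weight))
--         adjacency_list_with_weights[end].append((start, weight))
--
--     # in a minHeap, if you store a tuple, the minimum property
--     # of the heap applies to the first element in that tuple
--     # here it applies to the weight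
--     minHeap = [(0, 0)] # holds (weight, node)
--     # initialized to (0, 0) because we are told that we start from
--     # 0 and the time spent to get from 0 to itself is 0
--
--     visited = set()
--     time = 0
--
--     while minHeap:
--         weight, node = heapq.heappop(minHeap)
--         if node in visited:
--             continue
--         visited.add(node)
--
--         time = max(time, weight)
--
--         for neighbor, neighborWeight in adjacency_list_with_weights[node]:
--             if neighbor not in visited:
--                 heapq.heappush(minHeap, (weight + neighborWeight, neighbor))
--
--     return time
-- ===== SOURCE B (Python) =====
-- def solve(n, edges):
--     adj = {}
--     for u, v, w in edges:
--         adj.setdefault(u, []).append((v, w))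
--         adj.setdefault(v, []).append((u, w))
--     dist = {0: 0}
--     visited = set()
--     time = 0
--     while True:
--         best = None
--         for v, d in dist.items():
--             if v not in visited and (best is None or (d, v) < best):
--                 best = (d, v)
--         if best is None:
--             return time
--         d, v = best
--         visited.add(v)
--         if d > time:
--             time = d
--         for nb, w in adj.get(v, ()):
--             if nb not in visited:
--                 nd = d + w
--                 if nb not in dist or nd < dist[nb]:
--                     dist[nb] = nd
-- ===== Notes on version B (the rewrite author's own statement) =====
-- stated objective: alternative
-- what changed: Replaces the heap-based Dijkstra (push duplicates, pop lexicographic minimum, skip visited stale entries) by the selection variant: a dict of tentative distances, a linear scan picking the unvisited (dist, node) minimum each round, and strict-improvement relaxation instead of unconditional pushes.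
import Mathlib
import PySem

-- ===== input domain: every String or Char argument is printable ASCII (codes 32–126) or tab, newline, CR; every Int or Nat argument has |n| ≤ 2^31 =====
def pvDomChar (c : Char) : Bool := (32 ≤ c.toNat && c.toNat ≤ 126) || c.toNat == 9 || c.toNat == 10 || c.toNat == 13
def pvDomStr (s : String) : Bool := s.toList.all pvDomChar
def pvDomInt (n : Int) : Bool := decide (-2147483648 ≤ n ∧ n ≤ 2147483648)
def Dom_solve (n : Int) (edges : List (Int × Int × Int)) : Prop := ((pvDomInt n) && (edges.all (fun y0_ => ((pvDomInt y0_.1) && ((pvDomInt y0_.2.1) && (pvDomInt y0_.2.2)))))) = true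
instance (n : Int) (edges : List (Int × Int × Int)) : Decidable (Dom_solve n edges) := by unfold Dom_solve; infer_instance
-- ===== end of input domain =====

-- B replaces A's heap-with-stale-entries Dijkstra by the array/dict selection variant
-- (tentative-distance dict, linear-scan minimum, strict-improvement relaxation); objective: alternative.

-- ===== PORT A =====
-- adjacency building: defaultdict(list), both directions
def abuild (edges : List (Int × Int × Int)) : PySem.Dict Int (List (Int × Int)) :=
  edges.foldl (fun d e =>
    let d1 := d.insert e.1 (d.getD e.1 [] ++ [(e.2.1, e.2.2)])
    d1.insert e.2.1 (d1.getD e.2.1 [] ++ [(e.1, e.2.2)])) PySem.Dict.empty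

-- heapq on tuples: the popped element is the lexicographic minimum of the multiset
def pmin (a b : Int × Int) : Int × Int :=
  if a.1 < b.1 ∨ (a.1 = b.1 ∧ a.2 ≤ b.2) then a else b

def heapMin (e : Int × Int) (hs : List (Int × Int)) : Int × Int := hs.foldl pmin e

-- the while-minHeap loop; fuel 1 + 2*|edges| bounds the number of pops (= pushes)
def aloop (adj : PySem.Dict Int (List (Int × Int))) :
    Nat → List (Int × Int) → PySem.Set Int → Int → Int
  | 0, _, _, time => time
  | _ + 1, [], _, time => time
  | fuel + 1, h :: hs, visited, time =>
    let m := heapMin h hs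
    let heap' := (h :: hs).erase m
    if PySem.Set.contains visited m.2 then
      aloop adj fuel heap' visited time
    else
      let visited' := PySem.Set.add visited m.2
      let time' := max time m.1
      let pushes := (adj.getD m.2 []).filterMap
        (fun p => if PySem.Set.contains visited' p.1 then none else some (m.1 + p.2, p.1))
      aloop adj fuel (heap' ++ pushes) visited' time'

def solve (n : Int) (edges : List (Int × Int × Int)) : Int :=
  aloop (abuild edges) (1 + 2 * edges.length) [(0, 0)] PySem.Set.empty 0

-- ===== PORT B =====
-- adjacency building: setdefault(u, []).append(...), both directions
def bbuild (edges : List (Int × Int × Int)) : PySem.Dict Int (List (Int × Int)) :=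
  edges.foldl (fun d e =>
    let d1 := d.insert e.1 (d.getD e.1 [] ++ [(e.2.1, e.2.2)])
    d1.insert e.2.1 (d1.getD e.2.1 [] ++ [(e.1, e.2.2)])) PySem.Dict.empty

-- the 'best' linear scan over dist.items: first lexicographic minimum among unvisited keys
def bbest (visited : PySem.Set Int) : List (Int × Int) → Option (Int × Int) → Option (Int × Int)
  | [], b => b
  | p :: ps, b =>
    if PySem.Set.contains visited p.1 then bbest visited ps b
    else
      match b with
      | none => bbest visited ps (some (p.2, p.1))
      | some m =>
        if p.2 < m.1 ∨ (p.2 = m.1 ∧ p.1 < m.2) then bbest visited ps (some (p.2, p.1))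
        else bbest visited ps (some m)

-- relaxation: dist[nb] = d + w only on strict improvement (or fresh key)
def brelax (visited : PySem.Set Int) (d : Int) :
    PySem.Dict Int Int → List (Int × Int) → PySem.Dict Int Int
  | dist, [] => dist
  | dist, p :: ps =>
    if PySem.Set.contains visited p.1 then brelax visited d dist ps
    else
      match dist.get? p.1 with
      | none => brelax visited d (dist.insert p.1 (d + p.2)) ps
      | some old =>
        if d + p.2 < old then brelax visited d (dist.insert p.1 (d + p.2)) ps
        else brelax visited d dist ps

-- the while-True loop; fuel 1 + 2*|edges| bounds the number of selected nodes
def bloop (adj : PySem.Dict Int (List (Int × Int))) :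
    Nat → PySem.Dict Int Int → PySem.Set Int → Int → Int
  | 0, _, _, time => time
  | fuel + 1, dist, visited, time =>
    match bbest visited dist.items none with
    | none => time
    | some m =>
      let visited' := PySem.Set.add visited m.2
      let time' := if m.1 > time then m.1 else time
      bloop adj fuel (brelax visited' m.1 dist (adj.getD m.2 [])) visited' time'

def solve_alt (n : Int) (edges : List (Int × Int × Int)) : Int :=
  bloop (bbuild edges) (1 + 2 * edges.length) (PySem.Dict.ofList [(0, 0)]) PySem.Set.empty 0

-- ===== PRECONDITION & SPEC =====
def Spec_solve (n : Int) (edges : List (Int × Int × Int)) (out : Int) : Prop := out = solve_alt n edges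
instance (n : Int) (edges : List (Int × Int × Int)) (out : Int) : Decidable (Spec_solve n edges out) := by unfold Spec_solve; infer_instance

-- ===== CLAIM (what is proved, stated in full; the proofs are below) =====
def Claim_equal_solve : Prop := ∀ (n : Int) (edges : List (Int × Int × Int)), Dom_solve n edges → Spec_solve n edges (solve n edges)

-- ===== LEMMAS AND PROOFS =====

-- lexicographic order on (weight, node) pairs
def LexLE (a b : Int × Int) : Prop := a.1 < b.1 ∨ (a.1 = b.1 ∧ a.2 ≤ b.2)

lemma lexle_refl (a : Int × Int) : LexLE a a := by unfold LexLE; omega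

lemma lexle_antisymm {a b : Int × Int} (h1 : LexLE a b) (h2 : LexLE b a) : a = b := by
  unfold LexLE at h1 h2
  have : a.1 = b.1 ∧ a.2 = b.2 := by omega
  exact Prod.ext this.1 this.2

lemma pmin_cases (a b : Int × Int) : pmin a b = a ∨ pmin a b = b := by
  unfold pmin; split <;> simp

lemma pmin_le_left (a b : Int × Int) : LexLE (pmin a b) a := by
  unfold pmin LexLE; split <;> omega

lemma pmin_le_right (a b : Int × Int) : LexLE (pmin a b) b := by
  unfold pmin LexLE; split <;> omega

lemma heapMin_mem (hs : List (Int × Int)) : ∀ e, heapMin e hs ∈ e :: hs := by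
  induction hs with
  | nil => intro e; simp [heapMin]
  | cons h t ih =>
    intro e
    have heq : heapMin e (h :: t) = heapMin (pmin e h) t := rfl
    rw [heq]
    rcases List.mem_cons.mp (ih (pmin e h)) with hm | hm
    · rw [hm]; rcases pmin_cases e h with hc | hc <;> rw [hc] <;> simp
    · simp [hm]

lemma lexle_trans {a b c : Int × Int} (h1 : LexLE a b) (h2 : LexLE b c) : LexLE a c := by
  unfold LexLE at *; omega

lemma heapMin_le (hs : List (Int × Int)) : ∀ e x, x ∈ e :: hs → LexLE (heapMin e hs) x := by
  induction hs with
  | nil => intro e x hx; simp at hx; subst hx; exact lexle_refl _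
  | cons h t ih =>
    intro e x hx
    have heq : heapMin e (h :: t) = heapMin (pmin e h) t := rfl
    rw [heq]
    have hself : pmin e h ∈ pmin e h :: t := by simp
    rcases List.mem_cons.mp hx with hx | hx
    · rw [hx]; exact lexle_trans (ih (pmin e h) _ hself) (pmin_le_left _ _)
    · rcases List.mem_cons.mp hx with hx | hx
      · rw [hx]; exact lexle_trans (ih (pmin e h) _ hself) (pmin_le_right _ _)
      · exact ih (pmin e h) x (by simp [hx])

-- the simulation invariant: for every unvisited node, the dict's tentative distance
-- is exactly the minimum weight of that node's entries in the heap
def SInv (heap : List (Int × Int)) (visited : PySem.Set Int) (dist : PySem.Dict Int Int) : Prop :=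
  dist.keys.Nodup ∧
  ∀ v : Int, v ∉ visited →
    (∀ w : Int, (w, v) ∈ heap → ∃ d, dist.get? v = some d ∧ d ≤ w) ∧
    (∀ d : Int, dist.get? v = some d → (d, v) ∈ heap)

-- remaining push capacity: total adjacency length of unvisited nodes
def cap (adj : PySem.Dict Int (List (Int × Int))) (visited : PySem.Set Int) : Nat :=
  (adj.items.map (fun p => if p.1 ∈ visited then 0 else p.2.length)).sum

-- number of unvisited keys of dist
def uc (dist : PySem.Dict Int Int) (visited : PySem.Set Int) : Nat :=
  dist.items.countP (fun p => decide (p.1 ∉ visited))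

lemma bbest_visited (visited : PySem.Set Int) :
    ∀ (L : List (Int × Int)) (b : Option (Int × Int)),
    (∀ p ∈ L, p.1 ∈ visited) → bbest visited L b = b := by
  intro L
  induction L with
  | nil => intro b _; rfl
  | cons p ps ih =>
    intro b hall
    have hp : PySem.Set.contains visited p.1 = true :=
      (PySem.Set.contains_iff _ _).mpr (hall p (by simp))
    simp only [bbest, hp, if_true]
    exact ih b (fun q hq => hall q (by simp [hq]))

lemma bbest_min (visited : PySem.Set Int) (w v : Int) (hv : v ∉ visited) :
    ∀ (L : List (Int × Int)) (b : Option (Int × Int)),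
    (∀ p ∈ L, p.1 ∉ visited → (p.1 = v → p.2 = w) ∧ LexLE (w, v) (p.2, p.1)) →
    (b = some (w, v) ∨ ((∃ p ∈ L, p.1 = v) ∧ (b = none ∨ ∃ x, b = some x ∧ LexLE (w, v) x))) →
    bbest visited L b = some (w, v) := by
  intro L
  induction L with
  | nil =>
    intro b h1 h2
    rcases h2 with hb | ⟨⟨p, hp, _⟩, _⟩
    · rw [hb]; rfl
    · simp at hp
  | cons p ps ih =>
    intro b h1 h2
    have h1' : ∀ q ∈ ps, q.1 ∉ visited → (q.1 = v → q.2 = w) ∧ LexLE (w, v) (q.2, q.1) :=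
      fun q hq => h1 q (by simp [hq])
    simp only [bbest]
    by_cases hcp : PySem.Set.contains visited p.1 = true
    · rw [if_pos hcp]
      apply ih _ h1'
      rcases h2 with hb | ⟨⟨q, hq, hqv⟩, hbb⟩
      · exact Or.inl hb
      · refine Or.inr ⟨⟨q, ?_, hqv⟩, hbb⟩
        rcases List.mem_cons.mp hq with h | h
        · exfalso
          rw [h] at hqv
          exact hv (hqv ▸ (PySem.Set.contains_iff _ _).mp hcp)
        · exact h
    · rw [if_neg hcp]
      have hp : p.1 ∉ visited := fun h => hcp ((PySem.Set.contains_iff _ _).mpr h)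
      obtain ⟨himp, hle⟩ := h1 p (by simp) hp
      have hle' : w < p.2 ∨ (w = p.2 ∧ v ≤ p.1) := hle
      rcases h2 with hb | ⟨⟨q, hq, hqv⟩, hbb⟩
      · rw [hb]
        have hnotlt : ¬ (p.2 < w ∨ (p.2 = w ∧ p.1 < v)) := by omega
        dsimp only
        rw [if_neg hnotlt]
        exact ih _ h1' (Or.inl rfl)
      · rcases hbb with hbnone | ⟨x, hbx, hwx⟩
        · rw [hbnone]
          dsimp only
          by_cases hpv : p.1 = v
          · exact ih _ h1' (Or.inl (by rw [himp hpv, hpv]))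
          · have hq' : q ∈ ps := by
              rcases List.mem_cons.mp hq with h | h
              · exact absurd (h ▸ hqv) hpv
              · exact h
            exact ih _ h1' (Or.inr ⟨⟨q, hq', hqv⟩, Or.inr ⟨(p.2, p.1), rfl, hle⟩⟩)
        · rw [hbx]
          dsimp only
          by_cases hcond : p.2 < x.1 ∨ (p.2 = x.1 ∧ p.1 < x.2)
          · rw [if_pos hcond]
            by_cases hpv : p.1 = v
            · exact ih _ h1' (Or.inl (by rw [himp hpv, hpv]))
            · have hq' : q ∈ ps := by
                rcases List.mem_cons.mp hq with h | h
                · exact absurd (h ▸ hqv) hpv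
                · exact h
              exact ih _ h1' (Or.inr ⟨⟨q, hq', hqv⟩, Or.inr ⟨(p.2, p.1), rfl, hle⟩⟩)
          · rw [if_neg hcond]
            by_cases hpv : p.1 = v
            · have hpw := himp hpv
              have hwx' : w < x.1 ∨ (w = x.1 ∧ v ≤ x.2) := hwx
              have hxw : LexLE x (w, v) := by
                show x.1 < (w, v).1 ∨ (x.1 = (w, v).1 ∧ x.2 ≤ (w, v).2)
                simp only
                omega
              have hx : x = (w, v) := (lexle_antisymm hwx hxw).symm
              exact ih _ h1' (Or.inl (by rw [hx]))
            · have hq' : q ∈ ps := by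
                rcases List.mem_cons.mp hq with h | h
                · exact absurd (h ▸ hqv) hpv
                · exact h
              exact ih _ h1' (Or.inr ⟨⟨q, hq', hqv⟩, Or.inr ⟨x, rfl, hwx⟩⟩)

lemma bloop_done (adj : PySem.Dict Int (List (Int × Int))) (visited : PySem.Set Int)
    (dist : PySem.Dict Int Int) (time : Int) (fB : Nat)
    (hSInv : SInv [] visited dist) : bloop adj fB dist visited time = time := by
  cases fB with
  | zero => rfl
  | succ fb =>
    have hall : ∀ p ∈ dist.items, p.1 ∈ visited := by
      intro p hp
      by_contra hv
      have hg : dist.get? p.1 = some p.2 :=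
        PySem.Dict.get?_of_mem_items dist (show (p.1, p.2) ∈ dist.items from hp) hSInv.1
      exact absurd ((hSInv.2 p.1 hv).2 p.2 hg) (List.not_mem_nil)
    simp only [bloop, bbest_visited visited dist.items none hall]

lemma sinv_push_none (heap : List (Int × Int)) (visited : PySem.Set Int)
    (dist : PySem.Dict Int Int) (nb nd : Int)
    (hg : dist.get? nb = none) (hI : SInv heap visited dist) :
    SInv (heap ++ [(nd, nb)]) visited (dist.insert nb nd) := by
  refine ⟨PySem.Dict.nodup_keys_insert _ _ _ hI.1, fun v hv => ?_⟩
  obtain ⟨ha, hb⟩ := hI.2 v hv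
  constructor
  · intro w' hw'
    rcases List.mem_append.mp hw' with hin | hin
    · by_cases hvnb : v = nb
      · subst hvnb
        obtain ⟨d, hd, _⟩ := ha w' hin
        rw [hg] at hd
        cases hd
      · obtain ⟨d, hd, hdle⟩ := ha w' hin
        exact ⟨d, by rw [PySem.Dict.get?_insert, if_neg hvnb]; exact hd, hdle⟩
    · rw [List.mem_singleton, Prod.mk.injEq] at hin
      obtain ⟨h1, h2⟩ := hin
      exact ⟨nd, by rw [h2, PySem.Dict.get?_insert, if_pos rfl], by omega⟩
  · intro d hd
    by_cases hvnb : v = nb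
    · subst hvnb
      rw [PySem.Dict.get?_insert, if_pos rfl] at hd
      injection hd with h
      exact List.mem_append.mpr (Or.inr (by simp [← h]))
    · rw [PySem.Dict.get?_insert, if_neg hvnb] at hd
      exact List.mem_append.mpr (Or.inl (hb d hd))

lemma sinv_push_lt (heap : List (Int × Int)) (visited : PySem.Set Int)
    (dist : PySem.Dict Int Int) (nb nd old : Int)
    (hg : dist.get? nb = some old) (hlt : nd < old) (hI : SInv heap visited dist) :
    SInv (heap ++ [(nd, nb)]) visited (dist.insert nb nd) := by
  refine ⟨PySem.Dict.nodup_keys_insert _ _ _ hI.1, fun v hv => ?_⟩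
  obtain ⟨ha, hb⟩ := hI.2 v hv
  constructor
  · intro w' hw'
    rcases List.mem_append.mp hw' with hin | hin
    · by_cases hvnb : v = nb
      · subst hvnb
        obtain ⟨d, hd, hdle⟩ := ha w' hin
        rw [hg] at hd
        injection hd with h
        exact ⟨nd, by rw [PySem.Dict.get?_insert, if_pos rfl], by omega⟩
      · obtain ⟨d, hd, hdle⟩ := ha w' hin
        exact ⟨d, by rw [PySem.Dict.get?_insert, if_neg hvnb]; exact hd, hdle⟩
    · rw [List.mem_singleton, Prod.mk.injEq] at hin
      obtain ⟨h1, h2⟩ := hin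
      exact ⟨nd, by rw [h2, PySem.Dict.get?_insert, if_pos rfl], by omega⟩
  · intro d hd
    by_cases hvnb : v = nb
    · subst hvnb
      rw [PySem.Dict.get?_insert, if_pos rfl] at hd
      injection hd with h
      exact List.mem_append.mpr (Or.inr (by simp [← h]))
    · rw [PySem.Dict.get?_insert, if_neg hvnb] at hd
      exact List.mem_append.mpr (Or.inl (hb d hd))

lemma sinv_push_ge (heap : List (Int × Int)) (visited : PySem.Set Int)
    (dist : PySem.Dict Int Int) (nb nd old : Int)
    (hg : dist.get? nb = some old) (hge : ¬ nd < old) (hI : SInv heap visited dist) :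
    SInv (heap ++ [(nd, nb)]) visited dist := by
  refine ⟨hI.1, fun v hv => ?_⟩
  obtain ⟨ha, hb⟩ := hI.2 v hv
  constructor
  · intro w' hw'
    rcases List.mem_append.mp hw' with hin | hin
    · exact ha w' hin
    · rw [List.mem_singleton, Prod.mk.injEq] at hin
      obtain ⟨h1, h2⟩ := hin
      exact ⟨old, by rw [h2]; exact hg, by omega⟩
  · intro d hd
    exact List.mem_append.mpr (Or.inl (hb d hd))

lemma brelax_inv (w : Int) (visited' : PySem.Set Int) :
    ∀ (L : List (Int × Int)) (heap : List (Int × Int)) (dist : PySem.Dict Int Int),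
    SInv heap visited' dist →
    SInv (heap ++ L.filterMap
          (fun p => if PySem.Set.contains visited' p.1 then none else some (w + p.2, p.1)))
        visited' (brelax visited' w dist L) := by
  intro L
  induction L with
  | nil => intro heap dist h; simpa [brelax] using h
  | cons p ps ih =>
    intro heap dist hInv
    by_cases hcp : PySem.Set.contains visited' p.1 = true
    · rw [List.filterMap_cons_none (by rw [if_pos hcp])]
      have hbr : brelax visited' w dist (p :: ps) = brelax visited' w dist ps := by
        simp only [brelax]; rw [if_pos hcp]
      rw [hbr]
      exact ih heap dist hInv
    · rw [List.filterMap_cons_some (by rw [if_neg hcp])]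
      have happ : heap ++ (w + p.2, p.1) :: List.filterMap
          (fun p => if PySem.Set.contains visited' p.1 then none else some (w + p.2, p.1)) ps
          = (heap ++ [(w + p.2, p.1)]) ++ List.filterMap
          (fun p => if PySem.Set.contains visited' p.1 then none else some (w + p.2, p.1)) ps := by
        simp
      rw [happ]
      have hbr : brelax visited' w dist (p :: ps) = brelax visited' w
          (match dist.get? p.1 with
           | none => dist.insert p.1 (w + p.2)
           | some old => if w + p.2 < old then dist.insert p.1 (w + p.2) else dist) ps := by
        simp only [brelax]
        rw [if_neg hcp]
        cases dist.get? p.1 with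
        | none => rfl
        | some old =>
          dsimp only
          by_cases h : w + p.2 < old
          · rw [if_pos h, if_pos h]
          · rw [if_neg h, if_neg h]
      rw [hbr]
      apply ih
      cases hg : dist.get? p.1 with
      | none => exact sinv_push_none heap visited' dist p.1 (w + p.2) hg hInv
      | some old =>
        show SInv (heap ++ [(w + p.2, p.1)]) visited'
          (if w + p.2 < old then dist.insert p.1 (w + p.2) else dist)
        by_cases h : w + p.2 < old
        · rw [if_pos h]
          exact sinv_push_lt heap visited' dist p.1 (w + p.2) old hg h hInv
        · rw [if_neg h]
          exact sinv_push_ge heap visited' dist p.1 (w + p.2) old hg h hInv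

lemma uc_insert_le (dist : PySem.Dict Int Int) (visited' : PySem.Set Int) (k nd : Int) :
    uc (dist.insert k nd) visited' ≤ uc dist visited' + 1 := by
  unfold uc
  by_cases hc : dist.contains k = true
  · rw [PySem.Dict.items_insert_of_contains dist _ hc, List.countP_map]
    have hcong : dist.items.countP
        ((fun p => decide (p.1 ∉ visited')) ∘ (fun p => if p.1 == k then (k, nd) else p))
        = dist.items.countP (fun p => decide (p.1 ∉ visited')) := by
      apply List.countP_congr
      intro q hq
      by_cases hb : (q.1 == k) = true
      · have hqk : q.1 = k := eq_of_beq hb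
        simp [Function.comp, hqk]
      · simp [Function.comp, hb]
    rw [hcong]
    omega
  · have hc' : dist.contains k = false := by
      cases h : dist.contains k
      · rfl
      · exact absurd h hc
    rw [PySem.Dict.items_insert_of_not_contains dist _ hc', List.countP_append]
    have : List.countP (fun p => decide (p.1 ∉ visited')) [(k, nd)] ≤ 1 := by
      rw [List.countP_cons, List.countP_nil]
      split <;> omega
    omega

lemma brelax_uc (w : Int) (visited' : PySem.Set Int) :
    ∀ (L : List (Int × Int)) (dist : PySem.Dict Int Int),
    uc (brelax visited' w dist L) visited' ≤ uc dist visited' + L.length := by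
  intro L
  induction L with
  | nil => intro dist; simp [brelax]
  | cons p ps ih =>
    intro dist
    simp only [brelax]
    by_cases hcp : PySem.Set.contains visited' p.1 = true
    · rw [if_pos hcp]
      have := ih dist
      simp only [List.length_cons]
      omega
    · rw [if_neg hcp]
      cases hg : dist.get? p.1 with
      | none =>
        have h1 := uc_insert_le dist visited' p.1 (w + p.2)
        have h2 := ih (dist.insert p.1 (w + p.2))
        simp only [List.length_cons]
        omega
      | some old =>
        show uc (if w + p.2 < old then brelax visited' w (dist.insert p.1 (w + p.2)) ps
          else brelax visited' w dist ps) visited' ≤ uc dist visited' + (p :: ps).length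
        by_cases himp : w + p.2 < old
        · rw [if_pos himp]
          have h1 := uc_insert_le dist visited' p.1 (w + p.2)
          have h2 := ih (dist.insert p.1 (w + p.2))
          simp only [List.length_cons]
          omega
        · rw [if_neg himp]
          have := ih dist
          simp only [List.length_cons]
          omega

lemma countP_visit_list (visited : PySem.Set Int) (v : Int) (hv : v ∉ visited) :
    ∀ (l : List (Int × Int)) (d : Int), (l.map (fun p => p.1)).Nodup → (v, d) ∈ l →
    l.countP (fun p => decide (p.1 ∉ PySem.Set.add visited v)) + 1
      = l.countP (fun p => decide (p.1 ∉ visited)) := by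
  intro l
  induction l with
  | nil => intro d _ h; simp at h
  | cons q t ih =>
    intro d hnd hmem
    rw [List.map_cons, List.nodup_cons] at hnd
    obtain ⟨hq, hndt⟩ := hnd
    rw [List.countP_cons, List.countP_cons]
    by_cases hq1 : q.1 = v
    · have htno : ∀ p ∈ t, p.1 ≠ v := by
        intro p hp hfv
        exact hq (by rw [← hq1] at hfv; exact (List.mem_map.mpr ⟨p, hp, hfv⟩))
      have htcnt : t.countP (fun p => decide (p.1 ∉ PySem.Set.add visited v))
          = t.countP (fun p => decide (p.1 ∉ visited)) := by
        apply List.countP_congr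
        intro p hp
        have hiff : p.1 ∈ PySem.Set.add visited v ↔ p.1 ∈ visited := by
          rw [PySem.Set.mem_add]; simp [htno p hp]
        simp [hiff]
      have h1 : (decide (q.1 ∉ PySem.Set.add visited v)) = false := by
        simp [PySem.Set.mem_add, hq1]
      have h2 : (decide (q.1 ∉ visited)) = true := by simp [hq1, hv]
      rw [htcnt, h1, h2]
      simp
    · have hmem' : (v, d) ∈ t := by
        rcases List.mem_cons.mp hmem with h | h
        · exact absurd (by rw [← h]) hq1
        · exact h
      have hqp : (decide (q.1 ∉ PySem.Set.add visited v)) = (decide (q.1 ∉ visited)) := by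
        have hiff : q.1 ∈ PySem.Set.add visited v ↔ q.1 ∈ visited := by
          rw [PySem.Set.mem_add]; simp [hq1]
        simp [hiff]
      rw [hqp, ← ih d hndt hmem']
      omega

lemma uc_visit (dist : PySem.Dict Int Int) (visited : PySem.Set Int) (v d : Int)
    (hnd : dist.keys.Nodup) (hmem : (v, d) ∈ dist.items) (hv : v ∉ visited) :
    uc dist (PySem.Set.add visited v) + 1 = uc dist visited := by
  exact countP_visit_list visited v hv dist.items d hnd hmem

lemma sum_visit_list (visited : PySem.Set Int) (v : Int) (hv : v ∉ visited) :
    ∀ (l : List (Int × List (Int × Int))) (lst : List (Int × Int)),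
    (l.map (fun p => p.1)).Nodup → (v, lst) ∈ l →
    (l.map (fun p => if p.1 ∈ PySem.Set.add visited v then 0 else p.2.length)).sum + lst.length
      = (l.map (fun p => if p.1 ∈ visited then 0 else p.2.length)).sum := by
  intro l
  induction l with
  | nil => intro lst _ h; simp at h
  | cons q t ih =>
    intro lst hnd hmem
    rw [List.map_cons, List.nodup_cons] at hnd
    obtain ⟨hq, hndt⟩ := hnd
    rw [List.map_cons, List.map_cons, List.sum_cons, List.sum_cons]
    by_cases hq1 : q.1 = v
    · have hqeq : q = (v, lst) := by
        rcases List.mem_cons.mp hmem with h | h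
        · exact h.symm
        · exact absurd (List.mem_map.mpr ⟨(v, lst), h, rfl⟩)
            (by rw [hq1] at hq; exact hq)
      have htno : ∀ p ∈ t, p.1 ≠ v := by
        intro p hp hfv
        exact hq (by rw [← hq1] at hfv; exact (List.mem_map.mpr ⟨p, hp, hfv⟩))
      have htsum : (t.map (fun p => if p.1 ∈ PySem.Set.add visited v then 0 else p.2.length))
          = (t.map (fun p => if p.1 ∈ visited then 0 else p.2.length)) := by
        apply List.map_congr_left
        intro p hp
        have hiff : p.1 ∈ PySem.Set.add visited v ↔ p.1 ∈ visited := by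
          rw [PySem.Set.mem_add]; simp [htno p hp]
        simp only [hiff]
      have h1 : (if q.1 ∈ PySem.Set.add visited v then 0 else q.2.length) = 0 := by
        rw [if_pos]; rw [PySem.Set.mem_add]; exact Or.inr hq1
      have h2 : (if q.1 ∈ visited then 0 else q.2.length) = q.2.length := by
        rw [if_neg]; rw [hq1]; exact hv
      have hlen : q.2.length = lst.length := by rw [hqeq]
      rw [htsum, h1, h2]
      omega
    · have hmem' : (v, lst) ∈ t := by
        rcases List.mem_cons.mp hmem with h | h
        · exact absurd (by rw [← h]) hq1
        · exact h
      have hqp : (if q.1 ∈ PySem.Set.add visited v then 0 else q.2.length)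
          = (if q.1 ∈ visited then 0 else q.2.length) := by
        have hiff : q.1 ∈ PySem.Set.add visited v ↔ q.1 ∈ visited := by
          rw [PySem.Set.mem_add]; simp [hq1]
        simp only [hiff]
      rw [hqp, ← ih lst hndt hmem']
      omega

lemma sum_visit_absent (visited : PySem.Set Int) (v : Int) :
    ∀ (l : List (Int × List (Int × Int))), (∀ p ∈ l, p.1 ≠ v) →
    (l.map (fun p => if p.1 ∈ PySem.Set.add visited v then 0 else p.2.length)).sum
      = (l.map (fun p => if p.1 ∈ visited then 0 else p.2.length)).sum := by
  intro l h
  congr 1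
  apply List.map_congr_left
  intro p hp
  have hiff : p.1 ∈ PySem.Set.add visited v ↔ p.1 ∈ visited := by
    rw [PySem.Set.mem_add]; simp [h p hp]
  simp only [hiff]

lemma cap_visit (adj : PySem.Dict Int (List (Int × Int))) (visited : PySem.Set Int) (v : Int)
    (hnd : adj.keys.Nodup) (hv : v ∉ visited) :
    cap adj (PySem.Set.add visited v) + (adj.getD v []).length = cap adj visited := by
  unfold cap
  by_cases hc : adj.contains v = true
  · rw [PySem.Dict.contains_eq_isSome_get?] at hc
    obtain ⟨lst, hg⟩ := Option.isSome_iff_exists.mp hc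
    have hD : adj.getD v [] = lst := PySem.Dict.getD_of_get?_eq_some adj [] hg
    have hm : (v, lst) ∈ adj.items := PySem.Dict.mem_items_of_get?_eq_some adj hg
    rw [hD]
    exact sum_visit_list visited v hv adj.items lst hnd hm
  · have hc' : adj.contains v = false := by
      cases h : adj.contains v
      · rfl
      · exact absurd h hc
    have hD : adj.getD v [] = [] := PySem.Dict.getD_of_not_contains adj [] hc'
    have hkeys : ∀ p ∈ adj.items, p.1 ≠ v := by
      intro p hp he
      exact hc ((PySem.Dict.contains_iff_mem_keys adj v).mpr (by
        show v ∈ adj.items.map (fun p => p.1)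
        exact List.mem_map.mpr ⟨p, hp, he⟩))
    rw [hD]
    simp only [List.length_nil, Nat.add_zero]
    exact sum_visit_absent visited v adj.items hkeys

lemma abuild_step_nodup (d : PySem.Dict Int (List (Int × Int))) (e : Int × Int × Int)
    (hd : d.keys.Nodup) :
    (((d.insert e.1 (d.getD e.1 [] ++ [(e.2.1, e.2.2)]))).insert e.2.1
      (((d.insert e.1 (d.getD e.1 [] ++ [(e.2.1, e.2.2)]))).getD e.2.1 [] ++ [(e.1, e.2.2)])).keys.Nodup := by
  apply PySem.Dict.nodup_keys_insert
  exact PySem.Dict.nodup_keys_insert _ _ _ hd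

lemma abuild_nodup (edges : List (Int × Int × Int)) : (abuild edges).keys.Nodup := by
  suffices aux : ∀ (es : List (Int × Int × Int)) (d : PySem.Dict Int (List (Int × Int))),
      d.keys.Nodup → (es.foldl (fun d e =>
        let d1 := d.insert e.1 (d.getD e.1 [] ++ [(e.2.1, e.2.2)])
        d1.insert e.2.1 (d1.getD e.2.1 [] ++ [(e.1, e.2.2)])) d).keys.Nodup by
    exact aux edges PySem.Dict.empty (by decide)
  intro es
  induction es with
  | nil => intro d hd; exact hd
  | cons e es ih =>
    intro d hd
    exact ih _ (abuild_step_nodup d e hd)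

def dsize (d : PySem.Dict Int (List (Int × Int))) : Nat :=
  (d.items.map (fun p => p.2.length)).sum

lemma sum_map_update_key (k : Int) (lst : List (Int × Int)) (x : Int × Int) :
    ∀ (l : List (Int × List (Int × Int))), (l.map (fun p => p.1)).Nodup → (k, lst) ∈ l →
    ((l.map (fun p => if p.1 == k then (k, lst ++ [x]) else p)).map (fun p => p.2.length)).sum
      = (l.map (fun p => p.2.length)).sum + 1 := by
  intro l
  induction l with
  | nil => intro _ h; simp at h
  | cons q t ih =>
    intro hnd hmem
    rw [List.map_cons, List.nodup_cons] at hnd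
    obtain ⟨hq, hndt⟩ := hnd
    simp only [List.map_cons, List.sum_cons]
    by_cases hqk : q.1 = k
    · have hqeq : q = (k, lst) := by
        rcases List.mem_cons.mp hmem with h | h
        · exact h.symm
        · exact absurd (List.mem_map.mpr ⟨(k, lst), h, rfl⟩)
            (by rw [hqk] at hq; exact hq)
      have htid : t.map (fun p => if p.1 == k then (k, lst ++ [x]) else p) = t := by
        have hcong : ∀ p ∈ t, (if p.1 == k then (k, lst ++ [x]) else p) = id p := by
          intro p hp
          have hpk : p.1 ≠ k := by
            intro he
            exact hq (by rw [hqk]; exact List.mem_map.mpr ⟨p, hp, he⟩)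
          simp [hpk]
        rw [List.map_congr_left hcong, List.map_id]
      rw [htid]
      have hhead : (if q.1 == k then (k, lst ++ [x]) else q) = (k, lst ++ [x]) := by
        simp [hqk]
      rw [hhead]
      have hlen : q.2.length = lst.length := by rw [hqeq]
      simp only [List.length_append, List.length_cons, List.length_nil]
      omega
    · have hhead : (if q.1 == k then (k, lst ++ [x]) else q) = q := by simp [hqk]
      rw [hhead]
      have hmem' : (k, lst) ∈ t := by
        rcases List.mem_cons.mp hmem with h | h
        · exact absurd (by rw [← h]) hqk
        · exact h
      rw [ih hndt hmem']
      omega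

lemma dsize_step (d : PySem.Dict Int (List (Int × Int))) (hnd : d.keys.Nodup)
    (k : Int) (x : Int × Int) :
    dsize (d.insert k (d.getD k [] ++ [x])) = dsize d + 1 := by
  unfold dsize
  by_cases hc : d.contains k = true
  · rw [PySem.Dict.contains_eq_isSome_get?] at hc
    obtain ⟨lst, hg⟩ := Option.isSome_iff_exists.mp hc
    have hD : d.getD k [] = lst := PySem.Dict.getD_of_get?_eq_some d [] hg
    have hm : (k, lst) ∈ d.items := PySem.Dict.mem_items_of_get?_eq_some d hg
    rw [hD, PySem.Dict.items_insert_of_contains d (lst ++ [x]) (by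
      rw [PySem.Dict.contains_eq_isSome_get?, hg]; rfl)]
    exact sum_map_update_key k lst x d.items hnd hm
  · have hc' : d.contains k = false := by
      cases h : d.contains k
      · rfl
      · exact absurd h hc
    have hD : d.getD k [] = [] := PySem.Dict.getD_of_not_contains d [] hc'
    rw [hD, PySem.Dict.items_insert_of_not_contains d _ hc']
    simp

lemma dsize_abuild_aux :
    ∀ (es : List (Int × Int × Int)) (d : PySem.Dict Int (List (Int × Int))),
    d.keys.Nodup →
    dsize (es.foldl (fun d e =>
      let d1 := d.insert e.1 (d.getD e.1 [] ++ [(e.2.1, e.2.2)])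
      d1.insert e.2.1 (d1.getD e.2.1 [] ++ [(e.1, e.2.2)])) d) = dsize d + 2 * es.length := by
  intro es
  induction es with
  | nil => intro d _; simp
  | cons e es ih =>
    intro d hd
    rw [List.foldl_cons]
    have hnd1 : (d.insert e.1 (d.getD e.1 [] ++ [(e.2.1, e.2.2)])).keys.Nodup :=
      PySem.Dict.nodup_keys_insert _ _ _ hd
    rw [ih _ (abuild_step_nodup d e hd)]
    show dsize ((d.insert e.1 (d.getD e.1 [] ++ [(e.2.1, e.2.2)])).insert e.2.1
      ((d.insert e.1 (d.getD e.1 [] ++ [(e.2.1, e.2.2)])).getD e.2.1 [] ++ [(e.1, e.2.2)]))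
      + 2 * es.length = dsize d + 2 * (e :: es).length
    rw [dsize_step _ hnd1 e.2.1 (e.1, e.2.2), dsize_step d hd e.1 (e.2.1, e.2.2)]
    simp only [List.length_cons]
    omega

lemma cap_abuild (edges : List (Int × Int × Int)) :
    cap (abuild edges) ([] : PySem.Set Int) = 2 * edges.length := by
  have hmap : (abuild edges).items.map
      (fun p => if p.1 ∈ ([] : PySem.Set Int) then 0 else p.2.length)
      = (abuild edges).items.map (fun p => p.2.length) :=
    List.map_congr_left (by intro p _; simp)
  have hcd : cap (abuild edges) ([] : PySem.Set Int) = dsize (abuild edges) := by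
    unfold cap dsize
    rw [hmap]
  rw [hcd]
  have haux := dsize_abuild_aux edges PySem.Dict.empty (by decide)
  have h0 : dsize (PySem.Dict.empty : PySem.Dict Int (List (Int × Int))) = 0 := by decide
  have h2 : dsize (abuild edges) = dsize PySem.Dict.empty + 2 * edges.length := haux
  rw [h2, h0]
  omega

lemma inv_init : SInv [(0, 0)] PySem.Set.empty (PySem.Dict.ofList [(0, 0)]) := by
  have hof : PySem.Dict.ofList [((0 : Int), (0 : Int))]
      = (PySem.Dict.empty : PySem.Dict Int Int).insert 0 0 := rfl
  constructor
  · decide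
  · intro v hv
    constructor
    · intro w hw
      simp only [List.mem_singleton, Prod.mk.injEq] at hw
      obtain ⟨hw1, hw2⟩ := hw
      subst hw1; subst hw2
      exact ⟨0, by decide, le_refl 0⟩
    · intro d hd
      rw [hof, PySem.Dict.get?_insert] at hd
      by_cases hv0 : v = (0 : Int)
      · subst hv0
        rw [if_pos rfl] at hd
        injection hd with h
        subst h
        simp
      · rw [if_neg hv0] at hd
        simp [PySem.Dict.get?_empty] at hd

lemma main_sim (adj : PySem.Dict Int (List (Int × Int))) (hadj : adj.keys.Nodup) :
    ∀ (fA : Nat) (heap : List (Int × Int)) (visited : PySem.Set Int)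
      (dist : PySem.Dict Int Int) (time : Int) (fB : Nat),
    SInv heap visited dist →
    heap.length + cap adj visited ≤ fA →
    uc dist visited + cap adj visited ≤ fB →
    aloop adj fA heap visited time = bloop adj fB dist visited time := by
  intro fA
  induction fA with
  | zero =>
    intro heap visited dist time fB hInv hfa hfb
    have hheap : heap = [] := by
      cases heap with
      | nil => rfl
      | cons a l => simp only [List.length_cons] at hfa; omega
    subst hheap
    exact (bloop_done adj visited dist time fB hInv).symm
  | succ f ih =>
    intro heap visited dist time fB hInv hfa hfb
    cases heap with
    | nil => exact (bloop_done adj visited dist time fB hInv).symm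
    | cons h hs =>
      have hcons : (h :: hs).length = hs.length + 1 := rfl
      simp only [aloop]
      have hmmem : heapMin h hs ∈ h :: hs := heapMin_mem hs h
      have hmle : ∀ x ∈ h :: hs, LexLE (heapMin h hs) x := heapMin_le hs h
      by_cases hc : PySem.Set.contains visited (heapMin h hs).2 = true
      · rw [if_pos hc]
        have hvm : (heapMin h hs).2 ∈ visited := (PySem.Set.contains_iff _ _).mp hc
        have hInv' : SInv ((h :: hs).erase (heapMin h hs)) visited dist := by
          refine ⟨hInv.1, fun v hv => ?_⟩
          obtain ⟨ha, hb⟩ := hInv.2 v hv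
          refine ⟨fun w' hw' => ha w' (List.mem_of_mem_erase hw'), fun d hd => ?_⟩
          have hmem := hb d hd
          have hne : (d, v) ≠ heapMin h hs := by
            intro he
            apply hv
            rw [← he] at hvm
            exact hvm
          exact (List.mem_erase_of_ne hne).mpr hmem
        have hlen : ((h :: hs).erase (heapMin h hs)).length + 1 = (h :: hs).length := by
          rw [List.length_erase_of_mem hmmem]
          simp
        have hgoal1 : ((h :: hs).erase (heapMin h hs)).length + cap adj visited ≤ f := by
          simp only [List.length_cons] at hfa
          omega
        exact ih _ _ _ _ _ hInv' hgoal1 hfb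
      · rw [if_neg hc]
        have hvm : (heapMin h hs).2 ∉ visited := fun hmem => hc ((PySem.Set.contains_iff _ _).mpr hmem)
        obtain ⟨ha, hb⟩ := hInv.2 (heapMin h hs).2 hvm
        obtain ⟨d0, hd0, hd0le⟩ := ha (heapMin h hs).1 hmmem
        have hd0in := hb d0 hd0
        have hled0 : LexLE (heapMin h hs) (d0, (heapMin h hs).2) := hmle _ hd0in
        have hdm : d0 = (heapMin h hs).1 := by
          have hl : (heapMin h hs).1 < d0 ∨ ((heapMin h hs).1 = d0 ∧ (heapMin h hs).2 ≤ (heapMin h hs).2) := hled0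
          omega
        rw [hdm] at hd0
        have hbest : bbest visited dist.items none = some ((heapMin h hs).1, (heapMin h hs).2) := by
          apply bbest_min visited (heapMin h hs).1 (heapMin h hs).2 hvm
          · intro p hp hpv
            have hgp : dist.get? p.1 = some p.2 :=
              PySem.Dict.get?_of_mem_items dist (show (p.1, p.2) ∈ dist.items from hp) hInv.1
            constructor
            · intro hpe
              rw [hpe, hd0] at hgp
              injection hgp with hh
              exact hh.symm
            · exact hmle _ ((hInv.2 p.1 hpv).2 p.2 hgp)
          · exact Or.inr ⟨⟨((heapMin h hs).2, (heapMin h hs).1),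
              PySem.Dict.mem_items_of_get?_eq_some dist hd0, rfl⟩, Or.inl rfl⟩
        have hucpos : 0 < uc dist visited := by
          unfold uc
          refine List.countP_pos_iff.mpr ⟨((heapMin h hs).2, (heapMin h hs).1),
            PySem.Dict.mem_items_of_get?_eq_some dist hd0, by simp [hvm]⟩
        cases fB with
        | zero => omega
        | succ fb =>
          simp only [bloop]
          rw [hbest]
          dsimp only
          have htime : (if (heapMin h hs).1 > time then (heapMin h hs).1 else time)
              = max time (heapMin h hs).1 := by
            split <;> omega
          rw [htime]
          have hInv1 : SInv ((h :: hs).erase (heapMin h hs))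
              (PySem.Set.add visited (heapMin h hs).2) dist := by
            refine ⟨hInv.1, fun v hv => ?_⟩
            have hvv : v ∉ visited := fun hx => hv ((PySem.Set.mem_add _ _ _).mpr (Or.inl hx))
            have hvne : v ≠ (heapMin h hs).2 := fun he => hv ((PySem.Set.mem_add _ _ _).mpr (Or.inr he))
            obtain ⟨ha', hb'⟩ := hInv.2 v hvv
            refine ⟨fun w' hw' => ha' w' (List.mem_of_mem_erase hw'), fun d hd => ?_⟩
            have hmem := hb' d hd
            have hne : (d, v) ≠ heapMin h hs := by
              intro he
              exact hvne (by rw [← he])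
            exact (List.mem_erase_of_ne hne).mpr hmem
          have hInv2 := brelax_inv (heapMin h hs).1 (PySem.Set.add visited (heapMin h hs).2)
            (adj.getD (heapMin h hs).2 []) ((h :: hs).erase (heapMin h hs)) dist hInv1
          apply ih _ _ _ _ _ hInv2
          · have hlen : ((h :: hs).erase (heapMin h hs)).length + 1 = (h :: hs).length := by
              rw [List.length_erase_of_mem hmmem]
              simp
            have hpushlen := List.length_filterMap_le
              (fun p => if PySem.Set.contains (PySem.Set.add visited (heapMin h hs).2) p.1
                then none else some ((heapMin h hs).1 + p.2, p.1))
              (adj.getD (heapMin h hs).2 [])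
            have hcap := cap_visit adj visited (heapMin h hs).2 hadj hvm
            rw [List.length_append]
            simp only [List.length_cons] at hfa
            omega
          · have hcap := cap_visit adj visited (heapMin h hs).2 hadj hvm
            have huc1 := uc_visit dist visited (heapMin h hs).2 (heapMin h hs).1 hInv.1
              (PySem.Dict.mem_items_of_get?_eq_some dist hd0) hvm
            have huc2 := brelax_uc (heapMin h hs).1 (PySem.Set.add visited (heapMin h hs).2)
              (adj.getD (heapMin h hs).2 []) dist
            omega

-- ===== VERDICT (by name: the statement is the Claim_ definition above) =====
theorem solve_spec : Claim_equal_solve := by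
  intro n edges _
  show solve n edges = solve_alt n edges
  unfold solve solve_alt
  have hb : bbuild edges = abuild edges := rfl
  rw [hb]
  apply main_sim (abuild edges) (abuild_nodup edges)
  · exact inv_init
  · show [(0, 0)].length + cap (abuild edges) ([] : PySem.Set Int) ≤ 1 + 2 * edges.length
    rw [cap_abuild]; simp
  · show uc (PySem.Dict.ofList [(0, 0)]) ([] : PySem.Set Int) + cap (abuild edges) ([] : PySem.Set Int) ≤ 1 + 2 * edges.length
    have h1 : uc (PySem.Dict.ofList [(0, 0)]) ([] : PySem.Set Int) = 1 := by decide
    rw [cap_abuild, h1]
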